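-- pv_equiv track=rewrite | github.com/Dontcallcook/py110 | py110/small_problems/test.py | group_ints
-- ===== SOURCE A (Python) =====
-- def group_ints(lst, key):
--     # pdb.set_trace()
--     switch = None
--     grouped = []
--     new_lst = []
--
--     if len(lst) == 0:
--         return []
--     elif lst[0] < key:
--         switch = 'lesser'
--     else:
--         switch = 'greater'
--
--     for num in lst:
--         if num < key:
--             if switch == 'greater':
--                 grouped.append(new_lst)
--                 new_lst = []
--                 switch = 'lesser'
--             new_lst.append(num)
--
--         elif num >= key:
--             if switch == 'lesser':
--                 grouped.append(new_lst)
--                 new_lst = []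
--                 switch = 'greater'
--             new_lst.append(num)
--
--     grouped.append(new_lst)
--
--     return grouped
-- ===== SOURCE B (Python) =====
-- def group_ints(lst, key):
--     out = []
--     i = 0
--     n = len(lst)
--     while i < n:
--         flag = lst[i] < key
--         j = i + 1
--         while j < n and (lst[j] < key) == flag:
--             j += 1
--         out.append(lst[i:j])
--         i = j
--     return out
-- ===== Notes on version B (the rewrite author's own statement) =====
-- stated objective: alternative
-- what changed: Replaced A's string-flag state machine with per-element flushing by a two-pointer scan that finds each maximal same-side run and slices it out of the input directly.
import Mathlib
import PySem

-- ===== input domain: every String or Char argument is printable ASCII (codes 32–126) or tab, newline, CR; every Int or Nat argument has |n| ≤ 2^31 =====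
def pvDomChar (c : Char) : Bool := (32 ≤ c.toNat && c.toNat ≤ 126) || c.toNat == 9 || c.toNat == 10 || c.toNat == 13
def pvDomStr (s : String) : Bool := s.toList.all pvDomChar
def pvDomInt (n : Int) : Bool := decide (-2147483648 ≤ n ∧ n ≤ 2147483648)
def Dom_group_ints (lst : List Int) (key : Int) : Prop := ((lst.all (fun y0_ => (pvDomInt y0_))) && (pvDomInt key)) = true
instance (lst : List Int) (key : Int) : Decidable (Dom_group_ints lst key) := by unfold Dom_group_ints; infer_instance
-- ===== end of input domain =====

-- B replaces A's string-flag state machine by a two-pointer scan that slices out each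
-- maximal run directly (objective: alternative decomposition, same O(n) cost).

-- ===== PORT A =====
-- state = (switch, grouped, new_lst), exactly A's three mutable variables
def groupStep (key : Int) (st : String × List (List Int) × List Int) (num : Int) :
    String × List (List Int) × List Int :=
  let switch := st.1
  let grouped := st.2.1
  let new_lst := st.2.2
  if num < key then
    if switch = "greater" then ("lesser", grouped ++ [new_lst], ([] : List Int) ++ [num])
    else (switch, grouped, new_lst ++ [num])
  else
    if switch = "lesser" then ("greater", grouped ++ [new_lst], ([] : List Int) ++ [num])
    else (switch, grouped, new_lst ++ [num])

def group_ints (lst : List Int) (key : Int) : List (List Int) :=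
  if lst.length = 0 then []
  else
    let switch : String := if lst.getD 0 0 < key then "lesser" else "greater"
    let st := lst.foldl (groupStep key) (switch, ([] : List (List Int)), ([] : List Int))
    st.2.1 ++ [st.2.2]

-- ===== PORT B =====
-- inner while: advance j while lst[j] has the same flag
def scanJ (lst : List Int) (key : Int) (flag : Bool) (j : Nat) : Nat :=
  if j < lst.length ∧ decide (lst.getD j 0 < key) = flag then scanJ lst key flag (j + 1) else j
termination_by lst.length - j
decreasing_by omega

theorem le_scanJ (lst : List Int) (key : Int) (flag : Bool) (j : Nat) : j ≤ scanJ lst key flag j := by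
  unfold scanJ
  split
  · exact Nat.le_trans (Nat.le_succ j) (le_scanJ lst key flag (j + 1))
  · exact Nat.le_refl j
termination_by lst.length - j
decreasing_by omega

-- outer while over start index i, appending lst[i:j] each pass
def bLoop (lst : List Int) (key : Int) (out : List (List Int)) (i : Nat) : List (List Int) :=
  if i < lst.length then
    let flag := decide (lst.getD i 0 < key)
    let j := scanJ lst key flag (i + 1)
    bLoop lst key (out ++ [PySem.List.slice lst (some (i : Int)) (some (j : Int))]) j
  else out
termination_by lst.length - i
decreasing_by
  have := le_scanJ lst key (decide (lst.getD i 0 < key)) (i + 1)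
  omega

def group_ints_alt (lst : List Int) (key : Int) : List (List Int) := bLoop lst key [] 0

-- ===== PRECONDITION & SPEC =====
def Spec_group_ints (lst : List Int) (key : Int) (out : List (List Int)) : Prop := out = group_ints_alt lst key
instance (lst : List Int) (key : Int) (out : List (List Int)) : Decidable (Spec_group_ints lst key out) := by unfold Spec_group_ints; infer_instance

-- ===== CLAIM (what is proved, stated in full; the proofs are below) =====
def Claim_equal_group_ints : Prop := ∀ (lst : List Int) (key : Int), Dom_group_ints lst key → Spec_group_ints lst key (group_ints lst key)

-- ===== LEMMAS AND PROOFS =====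

-- canonical description of the result: the list of maximal constant-flag runs
def runs (key : Int) : List Int → List (List Int)
  | [] => []
  | x :: xs =>
    (x :: xs.takeWhile (fun y => decide (y < key) == decide (x < key))) ::
      runs key (xs.dropWhile (fun y => decide (y < key) == decide (x < key)))
termination_by l => l.length
decreasing_by
  exact Nat.lt_succ_of_le (List.length_dropWhile_le _ _)

-- A-side intermediate: process xs with current flag and current run cur
def consume (key : Int) : Bool → List Int → List Int → List (List Int)
  | _, cur, [] => [cur]
  | flag, cur, y :: ys =>
    if decide (y < key) = flag then consume key flag (cur ++ [y]) ys
    else cur :: consume key (!flag) [y] ys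

theorem take_takeWhile_length {α : Type} (p : α → Bool) (l : List α) :
    l.take (l.takeWhile p).length = l.takeWhile p := by
  induction l with
  | nil => rfl
  | cons a l ih =>
    by_cases h : p a
    · simp [h, ih]
    · simp [h]

theorem drop_takeWhile_length {α : Type} (p : α → Bool) (l : List α) :
    l.drop (l.takeWhile p).length = l.dropWhile p := by
  induction l with
  | nil => rfl
  | cons a l ih =>
    by_cases h : p a
    · simp [h, ih]
    · simp [h]

theorem scanJ_eq (lst : List Int) (key : Int) (flag : Bool) (j : Nat) :
    scanJ lst key flag j = j + ((lst.drop j).takeWhile (fun y => decide (y < key) == flag)).length := by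
  rw [scanJ]
  by_cases h : j < lst.length
  · have hj : lst.getD j 0 = lst[j] := List.getD_eq_getElem lst 0 h
    by_cases hp : decide (lst[j] < key) = flag
    · rw [if_pos ⟨h, by rw [hj]; exact hp⟩]
      rw [scanJ_eq lst key flag (j + 1)]
      rw [List.drop_eq_getElem_cons h, List.takeWhile_cons, if_pos (by simp [hp])]
      simp
      omega
    · rw [if_neg (by rw [hj]; tauto)]
      rw [List.drop_eq_getElem_cons h, List.takeWhile_cons, if_neg (by simp [hp])]
      simp
  · rw [if_neg (by tauto)]
    rw [List.drop_eq_nil_iff.mpr (by omega)]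
    simp
termination_by lst.length - j
decreasing_by omega

theorem bLoop_eq (lst : List Int) (key : Int) (out : List (List Int)) (i : Nat) :
    bLoop lst key out i = out ++ runs key (lst.drop i) := by
  rw [bLoop]
  by_cases h : i < lst.length
  · rw [if_pos h]
    have hi : lst.getD i 0 = lst[i] := List.getD_eq_getElem lst 0 h
    rw [bLoop_eq lst key _ (scanJ lst key (decide (lst.getD i 0 < key)) (i + 1))]
    rw [scanJ_eq, hi]
    rw [PySem.List.slice_natCast]
    have hlen : i + 1 + ((lst.drop (i + 1)).takeWhile
          (fun y => decide (y < key) == decide (lst[i] < key))).length - i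
        = ((lst.drop (i + 1)).takeWhile
          (fun y => decide (y < key) == decide (lst[i] < key))).length + 1 := by omega
    have e2 : lst.drop (i + 1 + ((lst.drop (i + 1)).takeWhile
          (fun y => decide (y < key) == decide (lst[i] < key))).length)
        = (lst.drop (i + 1)).dropWhile (fun y => decide (y < key) == decide (lst[i] < key)) := by
      have := drop_takeWhile_length (fun y => decide (y < key) == decide (lst[i] < key)) (lst.drop (i + 1))
      rwa [List.drop_drop] at this
    rw [hlen, e2, List.drop_eq_getElem_cons h, List.take_succ_cons, take_takeWhile_length, runs]
    simp only [List.append_assoc, List.singleton_append]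
  · rw [if_neg h]
    rw [List.drop_eq_nil_iff.mpr (by omega)]
    simp [runs]
termination_by lst.length - i
decreasing_by
  have := le_scanJ lst key (decide (lst.getD i 0 < key)) (i + 1)
  omega

theorem foldA (key : Int) (xs : List Int) (flag : Bool) (grouped : List (List Int)) (cur : List Int) :
    (xs.foldl (groupStep key) ((if flag then "lesser" else "greater"), grouped, cur)).2.1 ++
      [(xs.foldl (groupStep key) ((if flag then "lesser" else "greater"), grouped, cur)).2.2]
      = grouped ++ consume key flag cur xs := by
  have e1 : (if (true : Bool) = true then "lesser" else "greater") = "lesser" := rfl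
  have e0 : (if (false : Bool) = true then "lesser" else "greater") = "greater" := rfl
  induction xs generalizing flag grouped cur with
  | nil => simp [consume]
  | cons y ys ih =>
    rw [List.foldl_cons]
    by_cases hy : y < key
    · cases flag with
      | true =>
        rw [e1]
        have hstep : groupStep key ("lesser", grouped, cur) y = ("lesser", grouped, cur ++ [y]) := by
          simp [groupStep, hy]
        have h2 := ih true grouped (cur ++ [y])
        rw [e1] at h2
        rw [hstep, h2, consume, if_pos (by simp [hy])]
      | false =>
        rw [e0]
        have hstep : groupStep key ("greater", grouped, cur) y = ("lesser", grouped ++ [cur], [y]) := by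
          simp [groupStep, hy]
        have h2 := ih true (grouped ++ [cur]) [y]
        rw [e1] at h2
        rw [hstep, h2, consume, if_neg (by simp [hy])]
        simp
    · cases flag with
      | true =>
        rw [e1]
        have hstep : groupStep key ("lesser", grouped, cur) y = ("greater", grouped ++ [cur], [y]) := by
          simp [groupStep, hy]
        have h2 := ih false (grouped ++ [cur]) [y]
        rw [e0] at h2
        rw [hstep, h2, consume, if_neg (by simp [hy])]
        simp
      | false =>
        rw [e0]
        have hstep : groupStep key ("greater", grouped, cur) y = ("greater", grouped, cur ++ [y]) := by
          simp [groupStep, hy]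
        have h2 := ih false grouped (cur ++ [y])
        rw [e0] at h2
        rw [hstep, h2, consume, if_pos (by simp [hy])]

theorem consume_eq (key : Int) (xs : List Int) (flag : Bool) (cur : List Int) :
    consume key flag cur xs =
      (cur ++ xs.takeWhile (fun y => decide (y < key) == flag)) ::
        runs key (xs.dropWhile (fun y => decide (y < key) == flag)) := by
  induction xs generalizing flag cur with
  | nil => simp [consume, runs]
  | cons y ys ih =>
    rw [consume]
    by_cases hp : decide (y < key) = flag
    · rw [if_pos hp, List.takeWhile_cons, if_pos (by simp [hp]), List.dropWhile_cons,
        if_pos (by simp [hp])]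
      rw [ih flag (cur ++ [y])]
      simp
    · rw [if_neg hp, List.takeWhile_cons, if_neg (by simp [hp]), List.dropWhile_cons,
        if_neg (by simp [hp])]
      have hflag : decide (y < key) = !flag := by
        cases flag <;> cases h : decide (y < key) <;> simp_all
      rw [ih (!flag) ([y]), runs, hflag]
      simp

-- ===== VERDICT (by name: the statement is the Claim_ definition above) =====
theorem group_ints_spec : Claim_equal_group_ints := by
  unfold Claim_equal_group_ints Spec_group_ints
  intro lst key _
  have hB : group_ints_alt lst key = runs key lst := by
    unfold group_ints_alt
    rw [bLoop_eq]
    simp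
  rw [hB]
  unfold group_ints
  cases lst with
  | nil => simp [runs]
  | cons x xs =>
    rw [if_neg (by simp)]
    have hx : (x :: xs).getD 0 0 = x := rfl
    have hsw : (if (x :: xs).getD 0 0 < key then "lesser" else "greater")
        = (if decide (x < key) = true then "lesser" else "greater") := by
      rw [hx]; by_cases h : x < key <;> simp [h]
    simp only [hsw]
    have := foldA key (x :: xs) (decide (x < key)) [] []
    rw [this]
    rw [consume_eq]
    rw [List.takeWhile_cons, if_pos (by simp), List.dropWhile_cons, if_pos (by simp)]
    rw [runs]
    simp
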